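-- pv_equiv track=rewrite | github.com/wspeier1/BE223A_2019 | Old code/localize_electrodes/BE224B Final Project.py | get_electrode_coord_2
-- ===== SOURCE A (Python) =====
-- def get_electrode_coord_2(electrode_coord_list,coord_list):
--     """
--     Function to get the coordinates of 2d points on the 3d surface
--
--     input: electrode_coord_list,coord_list
--     output: projected_coord_list
--
--     Electrode_coord_list is a list of coordinates of the
--     electrode on the fluoroscopic image. Coord_list is a
--     list of coordinates of all the points on a hull.
--     For each set of electrode cooridnates in the
--     electrode_coord_list, a ray perpendicular to the fluoroscopy
--     will be generated and the intersection of the ray with the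
--     hull surface will be saved into the projected_coord_list.
--
--     """
--     projected_coord_list = []
--
--     for i in range(len(electrode_coord_list)):
--         electrode_coord = electrode_coord_list[i]
--
--         ray_point_list = []
--         start_point = electrode_coord
--         for i in range(256):
--             ray_point_list.append([start_point[0], start_point[1], i])
--
--         for i in range(len(ray_point_list)):
--             if ray_point_list[i] in coord_list:
--                 projected_coord_list.append(ray_point_list[i])
--                 break #only pick the first intersection point
--
--     return projected_coord_list
-- ===== SOURCE B (Python) =====
-- def get_electrode_coord_2(electrode_coord_list, coord_list):
--     # Index the hull points once: (x, y) -> smallest z in range(256),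
--     # then answer each electrode with a single dictionary lookup.
--     index = {}
--     for c in coord_list:
--         if len(c) == 3 and 0 <= c[2] < 256:
--             k = (c[0], c[1])
--             z = c[2]
--             prev = index.get(k)
--             if prev is None or z < prev:
--                 index[k] = z
--     projected_coord_list = []
--     for e in electrode_coord_list:
--         z = index.get((e[0], e[1]))
--         if z is not None:
--             projected_coord_list.append([e[0], e[1], z])
--     return projected_coord_list
-- ===== Notes on version B (the rewrite author's own statement) =====
-- stated objective: faster
-- what changed: Replaces the per-electrode 256-point ray scan with linear membership tests by a single pass that indexes hull points (x,y) -> minimal in-range z in a dict, turning each electrode into one O(1) lookup.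
import Mathlib
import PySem

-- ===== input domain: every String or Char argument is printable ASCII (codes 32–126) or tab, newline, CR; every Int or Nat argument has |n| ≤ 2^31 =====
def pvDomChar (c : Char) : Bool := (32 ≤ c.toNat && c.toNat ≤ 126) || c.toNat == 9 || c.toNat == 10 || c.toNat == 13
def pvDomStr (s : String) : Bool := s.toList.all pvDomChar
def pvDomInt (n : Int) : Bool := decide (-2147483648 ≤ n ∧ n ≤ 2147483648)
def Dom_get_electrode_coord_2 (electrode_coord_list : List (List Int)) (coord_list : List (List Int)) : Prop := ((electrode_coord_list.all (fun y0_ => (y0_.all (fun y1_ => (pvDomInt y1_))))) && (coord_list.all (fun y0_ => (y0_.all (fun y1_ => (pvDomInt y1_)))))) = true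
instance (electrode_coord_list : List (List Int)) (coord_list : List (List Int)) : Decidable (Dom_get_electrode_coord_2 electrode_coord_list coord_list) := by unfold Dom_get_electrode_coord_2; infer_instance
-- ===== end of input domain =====

-- B replaces A's per-electrode 256-step ray scan by a one-pass (x,y) -> min-z dict index plus O(1) lookups (objective: faster).

-- ===== PORT A =====
-- A: for each electrode, build the 256-point vertical ray, then scan it for the
-- first point contained in coord_list.
def get_electrode_coord_2 (electrode_coord_list : List (List Int)) (coord_list : List (List Int)) : List (List Int) :=
  electrode_coord_list.foldl (fun projected_coord_list electrode_coord =>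
    let ray_point_list := (PySem.List.pyRange 0 256 1).map
      (fun i => [PySem.List.pyGetD electrode_coord 0 0, PySem.List.pyGetD electrode_coord 1 0, i])
    match ray_point_list.find? (fun p => coord_list.contains p) with
    | some p => projected_coord_list ++ [p]
    | none => projected_coord_list) []

-- ===== PORT B =====
-- B helpers: one pass over coord_list building (x,y) -> minimal z with 0 ≤ z < 256.
def pvIndexStep (index : PySem.Dict (Int × Int) Int) (c : List Int) : PySem.Dict (Int × Int) Int :=
  match c with
  | [x, y, z] =>
    if 0 ≤ z ∧ z < 256 then
      match index.get? (x, y) with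
      | some prev => if z < prev then index.insert (x, y) z else index
      | none => index.insert (x, y) z
    else index
  | _ => index

def pvBuildIndex (coord_list : List (List Int)) : PySem.Dict (Int × Int) Int :=
  coord_list.foldl pvIndexStep PySem.Dict.empty

def get_electrode_coord_2_alt (electrode_coord_list : List (List Int)) (coord_list : List (List Int)) : List (List Int) :=
  let index := pvBuildIndex coord_list
  electrode_coord_list.foldl (fun projected_coord_list e =>
    let x := PySem.List.pyGetD e 0 0
    let y := PySem.List.pyGetD e 1 0
    match index.get? (x, y) with
    | some z => projected_coord_list ++ [[x, y, z]]
    | none => projected_coord_list) []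

-- ===== PRECONDITION & SPEC =====
-- Pre_ excludes electrode coordinates with fewer than two components, on which the
-- Python A raises IndexError (B raises there too).
def Pre_get_electrode_coord_2 (electrode_coord_list : List (List Int)) (coord_list : List (List Int)) : Prop :=
  ∀ e ∈ electrode_coord_list, 2 ≤ e.length
instance (electrode_coord_list : List (List Int)) (coord_list : List (List Int)) : Decidable (Pre_get_electrode_coord_2 electrode_coord_list coord_list) := by unfold Pre_get_electrode_coord_2; infer_instance
def pvWitness_get_electrode_coord_2 : List (List Int) × List (List Int) := ([[1, 2]], [[1, 2, 5], [0, 0, 3]])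

def Spec_get_electrode_coord_2 (electrode_coord_list : List (List Int)) (coord_list : List (List Int)) (out : List (List Int)) : Prop := out = get_electrode_coord_2_alt electrode_coord_list coord_list
instance (electrode_coord_list : List (List Int)) (coord_list : List (List Int)) (out : List (List Int)) : Decidable (Spec_get_electrode_coord_2 electrode_coord_list coord_list out) := by unfold Spec_get_electrode_coord_2; infer_instance

-- ===== CLAIM (what is proved, stated in full; the proofs are below) =====
def Claim_equal_get_electrode_coord_2 : Prop := ∀ (electrode_coord_list : List (List Int)) (coord_list : List (List Int)), Dom_get_electrode_coord_2 electrode_coord_list coord_list → Pre_get_electrode_coord_2 electrode_coord_list coord_list → Spec_get_electrode_coord_2 electrode_coord_list coord_list (get_electrode_coord_2 electrode_coord_list coord_list)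

-- ===== LEMMAS AND PROOFS =====

-- find? only looks at members, so pointwise-equal predicates agree.
theorem pv_find?_congr {α : Type} (l : List α) (p q : α → Bool)
    (h : ∀ a ∈ l, p a = q a) : l.find? p = l.find? q := by
  induction l with
  | nil => rfl
  | cons a t ih =>
    simp only [List.find?]
    rw [h a (List.mem_cons_self)]
    cases q a with
    | true => rfl
    | false => exact ih (fun x hx => h x (List.mem_cons_of_mem _ hx))

-- Adding the disjunct "z = z'" (z' inside the range) to a find? over an increasing
-- integer range: the result is the smaller of the old result and z'.
theorem pv_find?_or_eq (p : Int → Bool) :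
    ∀ (n : Nat) (a z' : Int), a ≤ z' → z' < a + n →
    (PySem.List.pyRange a (a + n) 1).find? (fun z => p z || z == z') =
      some (match (PySem.List.pyRange a (a + n) 1).find? p with
            | some z0 => min z0 z'
            | none => z') := by
  intro n
  induction n with
  | zero => intro a z' h1 h2; omega
  | succ m ih =>
    intro a z' h1 h2
    have hab : a < a + (m + 1 : Nat) := by push_cast; omega
    rw [PySem.List.pyRange_one_cons hab]
    by_cases hpa : p a = true
    · simp only [List.find?, hpa, Bool.true_or]
      have : min a z' = a := by omega
      simp [this]
    · have hpa' : p a = false := by simpa using hpa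
      by_cases haz : a = z'
      · subst haz
        simp only [List.find?, hpa', Bool.false_or, BEq.rfl]
        rcases hfp : (PySem.List.pyRange (a + 1) (a + (m + 1 : Nat)) 1).find? p with _ | z0
        · simp
        · have hz0 : z0 ∈ PySem.List.pyRange (a + 1) (a + (m + 1 : Nat)) 1 :=
            List.mem_of_find?_eq_some hfp
          rw [PySem.List.mem_pyRange_one] at hz0
          have : min z0 a = a := by omega
          simp [this]
      · have h1' : a + 1 ≤ z' := by omega
        have h2' : z' < (a + 1) + (m : Nat) := by push_cast at h2 ⊢; omega
        have hz : (a == z') = false := by simp [haz]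
        have harange : a + (m + 1 : Nat) = (a + 1) + (m : Nat) := by push_cast; ring
        simp only [List.find?, hpa', hz, Bool.or_false]
        rw [harange]
        exact ih (a + 1) z' h1' h2'

-- The dict built by B holds, at key (x, y), exactly A's first ray hit.
theorem pv_index_get? (coord_list : List (List Int)) (x y : Int) :
    (pvBuildIndex coord_list).get? (x, y) =
      (PySem.List.pyRange 0 256 1).find? (fun z => coord_list.contains [x, y, z]) := by
  induction coord_list using List.reverseRecOn with
  | nil =>
    rw [show (pvBuildIndex []).get? (x, y) = none by simp [pvBuildIndex]]
    symm
    rw [List.find?_eq_none]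
    intro a _; simp
  | append_singleton l c ih =>
    have hstep : pvBuildIndex (l ++ [c]) = pvIndexStep (pvBuildIndex l) c := by
      simp [pvBuildIndex, List.foldl_append]
    have hskip : ∀ (hne : ∀ z : Int, 0 ≤ z → z < 256 → [x, y, z] ≠ c),
        (PySem.List.pyRange 0 256 1).find? (fun z => (l ++ [c]).contains [x, y, z]) =
        (PySem.List.pyRange 0 256 1).find? (fun z => l.contains [x, y, z]) := by
      intro hne
      apply pv_find?_congr
      intro z hz
      rw [PySem.List.mem_pyRange_one] at hz
      simp only [List.contains_append, List.contains_cons, List.contains_nil, Bool.or_false]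
      have : ([x, y, z] == c) = false := by
        rw [beq_eq_false_iff_ne]
        exact hne z hz.1 hz.2
      simp [this]
    rcases c with _ | ⟨cx, _ | ⟨cy, _ | ⟨cz, _ | ⟨cd, ctl⟩⟩⟩⟩
    case nil =>
      rw [hstep, hskip (by intro z _ _ h; simp at h)]; simpa [pvIndexStep] using ih
    case cons.nil =>
      rw [hstep, hskip (by intro z _ _ h; simp at h)]; simpa [pvIndexStep] using ih
    case cons.cons.nil =>
      rw [hstep, hskip (by intro z _ _ h; simp at h)]; simpa [pvIndexStep] using ih
    case cons.cons.cons.cons =>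
      rw [hstep, hskip (by intro z _ _ h; simp at h)]; simpa [pvIndexStep] using ih
    case cons.cons.cons.nil =>
      -- c = [cx, cy, cz]
      by_cases hrange : 0 ≤ cz ∧ cz < 256
      · by_cases hxy : x = cx ∧ y = cy
        · obtain ⟨hx, hy⟩ := hxy
          subst hx; subst hy
          have hpred : ∀ z ∈ PySem.List.pyRange 0 256 1,
              ((l ++ [[x, y, cz]]).contains [x, y, z]) = (l.contains [x, y, z] || (z == cz)) := by
            intro z _
            simp only [List.contains_append, List.contains_cons, List.contains_nil, Bool.or_false]
            congr 1
            by_cases h : z = cz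
            · subst h; simp
            · have h1 : ([x, y, z] == [x, y, cz]) = false := by
                rw [beq_eq_false_iff_ne]
                intro hc; injection hc with _ hc; injection hc with _ hc
                injection hc with hzz _; exact h hzz
              have h2 : (z == cz) = false := by rw [beq_eq_false_iff_ne]; exact h
              rw [h1, h2]
          rw [pv_find?_congr _ _ _ hpred]
          have h256 : (256 : Int) = 0 + ((256 : Nat) : Int) := by norm_num
          rw [h256, pv_find?_or_eq (fun z => l.contains [x, y, z]) 256 0 cz (by omega)
            (by push_cast; omega)]
          rw [hstep]
          simp only [pvIndexStep, hrange, and_self, if_true]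
          rw [ih]
          have hrw : PySem.List.pyRange 0 (0 + ((256 : Nat) : Int)) 1 = PySem.List.pyRange 0 256 1 := by
            norm_num
          rw [hrw]
          rcases hf : (PySem.List.pyRange 0 256 1).find? (fun z => l.contains [x, y, z]) with _ | z0
          · simp [PySem.Dict.get?_insert_self]
          · by_cases hlt : cz < z0
            · have hmin : min z0 cz = cz := by omega
              simp [hlt, hmin, PySem.Dict.get?_insert_self]
            · have hmin : min z0 cz = z0 := by omega
              simp only [if_neg hlt, hmin, ih, hf]
        · have hkey : (x, y) ≠ (cx, cy) := by
            intro h; injection h with h1 h2; exact hxy ⟨h1, h2⟩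
          have hne : ∀ z : Int, 0 ≤ z → z < 256 → [x, y, z] ≠ [cx, cy, cz] := by
            intro z _ _ hc
            injection hc with h1 hc; injection hc with h2 _
            exact hxy ⟨h1, h2⟩
          rw [hstep, hskip hne, ← ih]
          simp only [pvIndexStep, hrange, and_self, if_true]
          rcases (pvBuildIndex l).get? (cx, cy) with _ | prev
          · exact PySem.Dict.get?_insert_of_ne _ _ hkey
          · by_cases hlt : cz < prev
            · simp only [hlt, if_true]
              exact PySem.Dict.get?_insert_of_ne _ _ hkey
            · simp [hlt]
      · have hne : ∀ z : Int, 0 ≤ z → z < 256 → [x, y, z] ≠ [cx, cy, cz] := by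
          intro z hz1 hz2 hc
          injection hc with _ hc; injection hc with _ hc; injection hc with hzz _
          subst hzz; exact hrange ⟨hz1, hz2⟩
        rw [hstep, hskip hne, ← ih]
        simp [pvIndexStep, hrange]

-- ===== VERDICT (by name: the statement is the Claim_ definition above) =====
theorem get_electrode_coord_2_spec : Claim_equal_get_electrode_coord_2 := by
  intro ecl ccl _ _
  unfold Spec_get_electrode_coord_2 get_electrode_coord_2 get_electrode_coord_2_alt
  apply PySem.List.foldl_congr_mem
  intro acc e _
  simp only
  rw [List.find?_map]
  simp only [Function.comp_def]
  rw [pv_index_get? ccl]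
  rcases (PySem.List.pyRange 0 256 1).find? (fun z => ccl.contains
      [PySem.List.pyGetD e 0 0, PySem.List.pyGetD e 1 0, z]) with _ | z <;> rfl
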